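-- pv_equiv track=rewrite | github.com/t0r1n88/Lachesis | deviant/pochebut_va.py | calc_value_fa
-- ===== SOURCE A (Python) =====
-- def calc_value_fa(row):
--     """
--     Функция для подсчета значения
--     :return: число
--     """
--     lst_pr = [3,4,11,18,19,28,34,27]
--     value_forward = 0  # результат
--     for idx, value in enumerate(row,1):
--         if idx in lst_pr:
--             if idx != 27:
--                 if value == 1:
--                     value_forward += 1
--             else:
--                 if value == 0:
--                     value_forward += 1
--
--     return value_forward
-- ===== SOURCE B (Python) =====
-- def calc_value_fa(row):
--     """
--     Функция для подсчета значения
--     :return: число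
--     """
--     pairs = ((3, 1), (4, 1), (11, 1), (18, 1), (19, 1), (27, 0), (28, 1), (34, 1))
--     n = len(row)
--     return sum(1 for pos, expected in pairs if pos <= n and row[pos - 1] == expected)
-- ===== Notes on version B (the rewrite author's own statement) =====
-- stated objective: faster
-- what changed: Instead of enumerating every element of the row and membership-testing its index against the target list, B keeps a fixed table of (position, expected-value) pairs and sums direct guarded index lookups over just those 8 positions.
import Mathlib
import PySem

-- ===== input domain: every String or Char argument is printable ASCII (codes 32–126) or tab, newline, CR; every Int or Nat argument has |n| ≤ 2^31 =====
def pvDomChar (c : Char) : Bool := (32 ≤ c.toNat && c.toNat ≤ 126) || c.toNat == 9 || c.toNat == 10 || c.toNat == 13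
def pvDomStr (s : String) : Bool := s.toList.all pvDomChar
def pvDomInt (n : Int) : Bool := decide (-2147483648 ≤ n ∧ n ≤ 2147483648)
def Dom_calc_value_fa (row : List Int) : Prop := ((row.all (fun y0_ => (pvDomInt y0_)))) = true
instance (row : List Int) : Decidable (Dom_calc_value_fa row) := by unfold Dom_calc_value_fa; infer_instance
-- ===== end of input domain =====

-- B replaces A's scan of the whole row (membership-testing every index) by direct
-- guarded lookups at the 8 fixed target positions; equivalence of return values is proved below.

-- ===== PORT A =====
def calc_value_fa (row : List Int) : Int :=
  (PySem.List.enumerate row 1).foldl (fun acc iv =>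
    if iv.1 ∈ ([3, 4, 11, 18, 19, 28, 34, 27] : List Int) then
      if iv.1 ≠ 27 then
        if iv.2 = 1 then acc + 1 else acc
      else
        if iv.2 = 0 then acc + 1 else acc
    else acc) 0

-- ===== PORT B =====
-- row[pos-1] with the guard pos ≤ len(row) and pos ≥ 1 is in range, so it is exactly getElem?.
def calc_value_fa_alt (row : List Int) : Int :=
  ([(3, 1), (4, 1), (11, 1), (18, 1), (19, 1), (27, 0), (28, 1), (34, 1)] : List (Nat × Int)).foldl
    (fun acc pe => if pe.1 ≤ row.length ∧ row[pe.1 - 1]? = some pe.2 then acc + 1 else acc) 0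

-- ===== PRECONDITION & SPEC =====
def Spec_calc_value_fa (row : List Int) (out : Int) : Prop := out = calc_value_fa_alt row
instance (row : List Int) (out : Int) : Decidable (Spec_calc_value_fa row out) := by unfold Spec_calc_value_fa; infer_instance

-- ===== CLAIM (what is proved, stated in full; the proofs are below) =====
def Claim_equal_calc_value_fa : Prop := ∀ (row : List Int), Dom_calc_value_fa row → Spec_calc_value_fa row (calc_value_fa row)

-- ===== LEMMAS AND PROOFS =====

/-- A's per-element contribution as a function of (1-based) index and value. -/
def contribA (idx v : Int) : Int :=
  if idx ∈ ([3, 4, 11, 18, 19, 28, 34, 27] : List Int) then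
    if idx ≠ 27 then
      if v = 1 then 1 else 0
    else
      if v = 0 then 1 else 0
  else 0

/-- Guarded count for one target position, relative to start index `s`. -/
def cnt (row : List Int) (s p : Nat) (e : Int) : Int :=
  if s ≤ p ∧ row[p - s]? = some e then 1 else 0

/-- Sum of the 8 guarded counts. -/
def S8 (row : List Int) (s : Nat) : Int :=
  cnt row s 3 1 + cnt row s 4 1 + cnt row s 11 1 + cnt row s 18 1 +
  cnt row s 19 1 + cnt row s 27 0 + cnt row s 28 1 + cnt row s 34 1

lemma contribA_eq (idx v : Int) :
    contribA idx v =
      (if idx = 3 ∧ v = 1 then 1 else 0) + (if idx = 4 ∧ v = 1 then 1 else 0) +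
      (if idx = 11 ∧ v = 1 then 1 else 0) + (if idx = 18 ∧ v = 1 then 1 else 0) +
      (if idx = 19 ∧ v = 1 then 1 else 0) + (if idx = 27 ∧ v = 0 then 1 else 0) +
      (if idx = 28 ∧ v = 1 then 1 else 0) + (if idx = 34 ∧ v = 1 then 1 else 0) := by
  simp only [contribA, List.mem_cons, List.not_mem_nil, or_false]
  split_ifs <;> omega

lemma cnt_cons (v : Int) (rest : List Int) (s p : Nat) (e : Int) :
    cnt (v :: rest) s p e = (if (s : Int) = (p : Int) ∧ v = e then 1 else 0) + cnt rest (s + 1) p e := by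
  unfold cnt
  rcases lt_trichotomy s p with h | h | h
  · obtain ⟨k, hk⟩ : ∃ k, p - s = k + 1 := ⟨p - s - 1, by omega⟩
    rw [hk]
    have h1 : ¬((s : Int) = (p : Int) ∧ v = e) := by
      rintro ⟨he, -⟩; omega
    have h2 : p - (s + 1) = k := by omega
    simp [h2, Nat.le_of_lt h, Nat.succ_le_of_lt h]
    omega
  · subst h
    have h2 : ¬(s + 1 ≤ s) := by omega
    simp [h2]
  · have h1 : ¬(s ≤ p) := by omega
    have h2 : ¬(s + 1 ≤ p) := by omega
    have h3 : ¬((s : Int) = (p : Int) ∧ v = e) := by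
      rintro ⟨he, -⟩; omega
    simp [h1, h2]
    omega

lemma main_sum (row : List Int) : ∀ s : Nat,
    ((PySem.List.enumerate row (s : Int)).map (fun iv => contribA iv.1 iv.2)).sum = S8 row s := by
  induction row with
  | nil =>
    intro s
    simp [PySem.List.enumerate_nil, S8, cnt]
  | cons v rest ih =>
    intro s
    rw [PySem.List.enumerate_cons]
    have hcast : ((s : Int) + 1) = ((s + 1 : Nat) : Int) := by push_cast; ring
    simp only [List.map_cons, List.sum_cons, hcast, ih (s + 1)]
    rw [contribA_eq]
    simp only [S8, cnt_cons]
    push_cast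
    ring

lemma step (row : List Int) (acc : Int) (p : Nat) (e : Int) (hp : 1 ≤ p) :
    (if p ≤ row.length ∧ row[p - 1]? = some e then acc + 1 else acc) = acc + cnt row 1 p e := by
  unfold cnt
  by_cases h : row[p - 1]? = some e
  · have hlen : p - 1 < row.length := (List.getElem?_eq_some_iff.mp h).1
    have h1 : p ≤ row.length := by omega
    simp [h, h1, hp]
  · simp [h]

lemma alt_eq_S8 (row : List Int) : calc_value_fa_alt row = S8 row 1 := by
  unfold calc_value_fa_alt
  simp only [List.foldl_cons, List.foldl_nil]
  rw [step row _ 34 1 (by norm_num), step row _ 28 1 (by norm_num),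
      step row _ 27 0 (by norm_num), step row _ 19 1 (by norm_num),
      step row _ 18 1 (by norm_num), step row _ 11 1 (by norm_num),
      step row _ 4 1 (by norm_num), step row _ 3 1 (by norm_num)]
  unfold S8
  ring

lemma a_eq_S8 (row : List Int) : calc_value_fa row = S8 row 1 := by
  unfold calc_value_fa
  have hbody : (fun (acc : Int) (iv : Int × Int) =>
      if iv.1 ∈ ([3, 4, 11, 18, 19, 28, 34, 27] : List Int) then
        if iv.1 ≠ 27 then
          if iv.2 = 1 then acc + 1 else acc
        else
          if iv.2 = 0 then acc + 1 else acc
      else acc) = (fun acc iv => acc + contribA iv.1 iv.2) := by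
    funext acc iv
    simp only [contribA]
    split_ifs <;> omega
  rw [hbody, PySem.List.foldl_add]
  have h1 : (1 : Int) = ((1 : Nat) : Int) := by norm_num
  rw [h1, main_sum row 1, zero_add]

-- ===== VERDICT (by name: the statement is the Claim_ definition above) =====
theorem calc_value_fa_spec : Claim_equal_calc_value_fa := by
  intro row _
  unfold Spec_calc_value_fa
  rw [a_eq_S8, alt_eq_S8]
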